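-- pv_equiv track=rewrite | github.com/AmenPark/code_test_study | 매출하락 최소화/solution.py | solution
-- ===== SOURCE A (Python) =====
-- class node:
--     '''
--     노드 선언. 하나의 노드는 하나의 사람을 의미
--     var - 해당 인원이 창출해내는 값어치.
--     boss - 해당 노드의 부모노드
--     dp_boss - 해당 노드까지의 서브트리 기준에서 해당 노드가 포함될 경우의 매출 하락값
--     dp_not - 해당 노드까지의 서브트리에서 매출 하락 최소지만 해당 노드는 미포함일 경우
--     dp_mate - 자식노드들의 리스트
--     '''
--     def __init__(self,sale):
--         self.var = sale
--         self.boss = None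
--         self.dp_boss = None
--         self.dp_not = None
--         self.mate = []
--
--     def get_dp_boss(self):
--         '''
--         해당 노드가 루트가 되는 서브트리 기준으로 해당 노드를 포함하면서 매출 하락이 최소가 될 경우
--         이것은 자식 노드들의 매출 하락 최소 서브트리의 합에 해당 노드의 값을  더한 값이다.
--         이 때 자식노드들의 매출 하락 최소값은 해당 자식노드 자체를 포함할 필요는 없다.
--         '''
--         if self.dp_boss == None:
--             self.dp_boss = 0
--             if len(self.mate) == 0:
--                 self.dp_boss = self.var
--                 return self.dp_boss
--             else:
--                 for nd in self.mate:
--                     self.dp_boss += min(nd.get_dp_boss(),nd.get_dp_not())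
--                 self.dp_boss += self.var
--                 return self.dp_boss
--         else:
--             return self.dp_boss
--
--     def get_dp_not(self):
--         '''
--         해당 노드가 루트가 되는 서브트리 기준으로 해당 노드가 포함되지 않으며 매출 하락이 최소가 되는 경우
--         자식 노드들에 대해서 최솟값을 찾아서 다 더해주면 된다.
--         다만 최상위 그룹에 대해서 누군가 하나가 포함되어야 하기 때문에 만약 모든 서브트리들이 루트를 미포함한다면 루트 포함과의 차이가 가장 적은 것을 루트가 포함하도록 바꿔준다.
--         코드에서는 루트 포함과 미포함의 차이 중 가장 작은 것을 기억하고, 서브트리가 모두 루트 미포함일 경우 그 값을 추가로 더하는 것으로 해결하였다.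
--         '''
--         if self.dp_not == None:
--             self.dp_not = 0
--             if len(self.mate) == 0:
--                 self.dp_not = 0
--                 return self.dp_not
--             else:
--                 min_var = self.mate[0].dp_boss
--                 bosscheck = False
--                 for nd in self.mate:
--                     if nd.get_dp_boss() < nd.get_dp_not():
--                         bosscheck = True
--                     if nd.get_dp_boss() - nd.get_dp_not() < min_var:
--                         min_var = nd.dp_boss - nd.dp_not
--                     self.dp_not += min(nd.get_dp_boss(),nd.get_dp_not())
--                 if bosscheck == False:
--                     self.dp_not += min_var
--                 return self.dp_not
--         else:
--             return self.dp_not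
--
-- def solution(sales, links):
--     N = len(links) + 1
--     nddic = {}
--     for i in range(N):  #노드생성
--         nddic[i+1] = node(sales[i])
--
--     for a,b in links: #노드 관계 생성
--         nddic[b].boss = nddic[a]
--         nddic[a].mate.append(nddic[b])
--
--     answer = min(nddic[1].get_dp_boss(),nddic[1].get_dp_not()) # 루트노드를 포함하거나, 포함하지 않거나 중 작은 것을 반환
--     return answer
-- ===== SOURCE B (Python) =====
-- def solution(sales, links):
--     n = len(links) + 1
--     children = [[] for _ in range(n + 1)]
--     for a, b in links:
--         children[a].append(b)
--     # BFS order from the root, then fill the dp tables iterating it backwards,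
--     # so every node's children are already computed when the node is reached.
--     order = [1]
--     i = 0
--     while i < len(order):
--         order.extend(children[order[i]])
--         i += 1
--     dp = {}
--     for v in reversed(order):
--         kids = children[v]
--         if not kids:
--             dp[v] = (sales[v - 1], 0)
--         else:
--             vals = [dp[c] for c in kids]
--             keep = sum(min(b_, n_) for b_, n_ in vals)
--             boss = sales[v - 1] + keep
--             if any(b_ < n_ for b_, n_ in vals):
--                 dp[v] = (boss, keep)
--             else:
--                 mv = vals[0][0]
--                 for b_, n_ in vals:
--                     if b_ - n_ < mv:
--                         mv = b_ - n_
--                 dp[v] = (boss, keep + mv)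
--     b1, n1 = dp[1]
--     return min(b1, n1)
-- ===== Notes on version B (the rewrite author's own statement) =====
-- stated objective: alternative
-- what changed: Replaces A's dict of node objects with memoized mutually-recursive get_dp_boss/get_dp_not methods by a fully iterative staged computation: build a children adjacency list, compute a BFS order from root 1 with an index loop, then fill a dp table of (boss, not) pairs by one backward pass over that order; A's quirky min_var seed (first child's dp_boss) and strict-< comparisons are kept exactly.
-- outside the precondition, e.g. on solution([1, 2, 3], [(1, 2), (2, 1)]): A returns 0, B does not finish within the time limit; on solution([1, 2, 3], [(1, 2), (1, 2)]): A returns 1, B returns 1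
import Mathlib
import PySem

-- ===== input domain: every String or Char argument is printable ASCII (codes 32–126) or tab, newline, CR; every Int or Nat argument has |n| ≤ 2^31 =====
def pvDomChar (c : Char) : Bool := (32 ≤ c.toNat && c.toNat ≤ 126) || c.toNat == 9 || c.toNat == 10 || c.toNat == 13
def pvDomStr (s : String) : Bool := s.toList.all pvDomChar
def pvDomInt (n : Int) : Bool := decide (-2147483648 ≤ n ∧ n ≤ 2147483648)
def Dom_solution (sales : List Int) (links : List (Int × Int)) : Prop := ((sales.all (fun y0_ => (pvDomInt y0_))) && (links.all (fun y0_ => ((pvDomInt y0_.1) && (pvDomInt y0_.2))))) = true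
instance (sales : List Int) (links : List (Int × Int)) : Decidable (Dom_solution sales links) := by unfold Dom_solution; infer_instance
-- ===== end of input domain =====

-- B replaces A's dict of node objects with memoized mutually-recursive methods by a fully
-- iterative staged computation: children adjacency list, a BFS order from root 1 built by an
-- index loop, then one backward pass over that order filling a dp table of (boss, not) pairs.


-- ===== PORT A =====
-- A builds a dict of node objects 1..N (var = sales[i], empty mate list), then appends each b
-- to nddic[a].mate.  We keep only the fields the answer reads: the mate dict (var is read back
-- from sales by index, total pyGetD form — guard only, the index is in range under Pre_).
-- (Dict.modify on a key outside 1..N inserts where Python raises KeyError — totality guard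
-- only; such inputs are outside Pre_solution.)
def aInitMates (N : Int) : PySem.Dict Int (List Int) :=
  (PySem.List.pyRange 0 N 1).foldl (fun d i => d.insert (i + 1) ([] : List Int)) PySem.Dict.empty

def aMates (N : Int) (links : List (Int × Int)) : PySem.Dict Int (List Int) :=
  links.foldl (fun d ab => d.modify ab.1 [] (fun l => l ++ [ab.2])) (aInitMates N)

-- get_dp_boss / get_dp_not.  The memo fields (dp_boss/dp_not caches) are dropped: on the trees
-- Pre_solution admits the methods are pure, so recomputation returns the cached value.
-- Fuel (links.length + 1 ≥ tree depth) is a totality guard only.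
mutual
def aDpBoss (sales : List Int) (mates : PySem.Dict Int (List Int)) : Nat → Int → Int
  | 0, _ => 0
  | f + 1, v =>
    let ms := mates.getD v []
    if ms.length = 0 then PySem.List.pyGetD sales (v - 1) 0
    else ms.foldl (fun acc nd => acc + min (aDpBoss sales mates f nd) (aDpNot sales mates f nd)) 0
           + PySem.List.pyGetD sales (v - 1) 0
def aDpNot (sales : List Int) (mates : PySem.Dict Int (List Int)) : Nat → Int → Int
  | 0, _ => 0
  | f + 1, v =>
    let ms := mates.getD v []
    if ms.length = 0 then 0
    else
      let minVar0 := aDpBoss sales mates f (ms.headD 0)      -- min_var = self.mate[0].dp_boss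
      -- state: (dp_not accumulator, bosscheck, min_var)
      let st := ms.foldl (fun (s : Int × Bool × Int) nd =>
          let b := aDpBoss sales mates f nd
          let n := aDpNot sales mates f nd
          (s.1 + min b n, s.2.1 || decide (b < n), if b - n < s.2.2 then b - n else s.2.2))
        (0, false, minVar0)
      if st.2.1 = false then st.1 + st.2.2 else st.1
end

def solution (sales : List Int) (links : List (Int × Int)) : Int :=
  let N : Int := (links.length : Int) + 1
  let mates := aMates N links
  min (aDpBoss sales mates (links.length + 1) 1) (aDpNot sales mates (links.length + 1) 1)

-- ===== PORT B =====
-- children[a].append(b): read children[a], write back with b appended (pyGetD/pySetD are the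
-- total guard forms of Python's indexing; under Pre_solution a is in range so neither guards).
def bChildren (links : List (Int × Int)) : List (List Int) :=
  links.foldl
    (fun c ab => PySem.List.pySetD c ab.1 (PySem.List.pyGetD c ab.1 [] ++ [ab.2]))
    (List.replicate (links.length + 1 + 1) [])

-- the 'while i < len(order): order.extend(children[order[i]]); i += 1' loop; fuel is a
-- totality guard only (under Pre_solution the order never exceeds links.length + 1 nodes,
-- so the loop always stops with i = len(order) before the fuel runs out).
def bBfsIdx (children : List (List Int)) : Nat → List Int → Nat → List Int
  | 0, order, _ => order
  | f + 1, order, i =>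
    if i < order.length then
      bBfsIdx children f (order ++ PySem.List.pyGetD children (order.getD i 0) []) (i + 1)
    else order

-- the body of 'for v in reversed(order)': fill dp[v] from the children's table entries
-- (dp[c] is read with getD — the total guard form of Python's dict lookup; under
-- Pre_solution every child is already in the table when its parent is reached).
def bStep (sales : List Int) (children : List (List Int))
    (dp : PySem.Dict Int (Int × Int)) (v : Int) : PySem.Dict Int (Int × Int) :=
  let kids := PySem.List.pyGetD children v []
  if kids = [] then dp.insert v (PySem.List.pyGetD sales (v - 1) 0, 0)
  else
    let vals := kids.map (fun c => dp.getD c (0, 0))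
    let keep := (vals.map (fun p => min p.1 p.2)).sum
    let boss := PySem.List.pyGetD sales (v - 1) 0 + keep
    if vals.any (fun p => p.1 < p.2) then dp.insert v (boss, keep)
    else
      let mv := vals.foldl (fun m p => if p.1 - p.2 < m then p.1 - p.2 else m) (vals.headD (0, 0)).1
      dp.insert v (boss, keep + mv)

def solution_alt (sales : List Int) (links : List (Int × Int)) : Int :=
  let children := bChildren links
  let order := bBfsIdx children (links.length + 1) [1] 0
  let dp := order.reverse.foldl (bStep sales children) PySem.Dict.empty
  let p := dp.getD 1 (0, 0)
  min p.1 p.2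

-- ===== PRECONDITION & SPEC =====
-- The natural domain: links form a parent-unique tree rooted at 1 (the problem's stated input
-- shape) and sales covers the N = len(links)+1 nodes.  Outside it A raises (KeyError/IndexError
-- on out-of-range nodes or a short sales list) or — when links repeat a child, make 1 a child,
-- or close a cycle — A returns accidental values of its half-filled memo fields (cycles) or
-- values B also returns (unreachable duplicates); B loops forever on a cycle through node 1.
def Pre_solution (sales : List Int) (links : List (Int × Int)) : Prop :=
  links.length + 1 ≤ sales.length ∧
  (∀ p ∈ links, 1 ≤ p.1 ∧ p.1 ≤ (links.length : Int) + 1 ∧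
                2 ≤ p.2 ∧ p.2 ≤ (links.length : Int) + 1) ∧
  (links.map Prod.snd).Nodup

instance (sales : List Int) (links : List (Int × Int)) : Decidable (Pre_solution sales links) := by
  unfold Pre_solution; infer_instance

def pvWitness_solution : List Int × (List (Int × Int)) := ([5, 3, 4], [(1, 2), (1, 3)])

def Spec_solution (sales : List Int) (links : List (Int × Int)) (out : Int) : Prop := out = solution_alt sales links
instance (sales : List Int) (links : List (Int × Int)) (out : Int) : Decidable (Spec_solution sales links out) := by unfold Spec_solution; infer_instance

-- ===== CLAIM (what is proved, stated in full; the proofs are below) =====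
def Claim_equal_solution : Prop := ∀ (sales : List Int) (links : List (Int × Int)), Dom_solution sales links → Pre_solution sales links → Spec_solution sales links (solution sales links)

-- ===== LEMMAS AND PROOFS =====

-- Every getD-with-[] lookup in A's initial all-keys-to-[] dict is [].
theorem aInit_getD (l : List Int) (d : PySem.Dict Int (List Int))
    (h : ∀ v, d.getD v [] = []) (v : Int) :
    (l.foldl (fun d i => d.insert (i + 1) ([] : List Int)) d).getD v [] = [] := by
  induction l generalizing d with
  | nil => exact h v
  | cons x t ih =>
      refine ih _ (fun w => ?_)
      rw [PySem.Dict.getD_insert]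
      split <;> simp [h]

-- A's mate list of v is the filter of links at first component v.
theorem aMates_getD (N : Int) (links : List (Int × Int)) (v : Int) :
    (aMates N links).getD v [] = (links.filter (fun p => p.1 == v)).map (·.2) := by
  unfold aMates
  rw [PySem.Dict.getD_foldl_modify_append]
  rw [aInitMates, aInit_getD _ _ (fun w => PySem.Dict.getD_empty w []) v, List.nil_append]

-- B's children-list build: appends land at the first components, in order.
theorem bBuild_getD (ls : List (Int × Int)) (c : List (List Int))
    (ha : ∀ p ∈ ls, 1 ≤ p.1 ∧ p.1 < (c.length : Int)) (v : Int)
    (hv0 : 0 ≤ v) (hvlt : v < (c.length : Int)) :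
    PySem.List.pyGetD
        (ls.foldl (fun c ab => PySem.List.pySetD c ab.1 (PySem.List.pyGetD c ab.1 [] ++ [ab.2])) c)
        v []
      = PySem.List.pyGetD c v [] ++ (ls.filter (fun p => p.1 == v)).map (·.2) := by
  induction ls generalizing c with
  | nil => simp
  | cons q t ih =>
      obtain ⟨hq1, hq2⟩ := ha q (List.mem_cons_self)
      have hcast : q.1 = ((q.1.toNat : Nat) : Int) := by omega
      have hvcast : v = ((v.toNat : Nat) : Int) := by omega
      have hlt : q.1.toNat < c.length := by omega
      have hlen : (PySem.List.pySetD c q.1 (PySem.List.pyGetD c q.1 [] ++ [q.2])).length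
          = c.length := by rw [hcast, PySem.List.pySetD_natCast, List.length_set]
      rw [List.foldl_cons,
        ih _ (fun p hp => by rw [hlen]; exact ha p (List.mem_cons_of_mem q hp)) (by rw [hlen]; exact hvlt)]
      have hstep : PySem.List.pyGetD
          (PySem.List.pySetD c q.1 (PySem.List.pyGetD c q.1 [] ++ [q.2])) v []
          = if v.toNat = q.1.toNat then PySem.List.pyGetD c q.1 [] ++ [q.2]
            else PySem.List.pyGetD c v [] := by
        rw [hcast, hvcast, PySem.List.pyGetD_pySetD_natCast c q.1.toNat v.toNat _ _ hlt]
        simp only [← hcast, ← hvcast]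
      rw [hstep, List.filter_cons]
      by_cases hv : v = q.1
      · have hT : v.toNat = q.1.toNat := by omega
        have hbeq : (q.1 == v) = true := by simp [hv]
        simp [hv, List.append_assoc]
      · have hT : ¬ v.toNat = q.1.toNat := by omega
        have hbeq : (q.1 == v) = false := by
          simp only [beq_eq_false_iff_ne, ne_eq]
          omega
        simp [hT, hbeq]

-- Queue form of the BFS index loop: the processed prefix is acc, the rest is the queue.
def bBfsAux (ch : Int → List Int) : Nat → List Int → List Int → List Int
  | 0, q, acc => acc ++ q
  | f + 1, q, acc =>
    match q with
    | [] => acc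
    | v :: q' => bBfsAux ch f (q' ++ ch v) (acc ++ [v])

theorem bfs_bridge (c : List (List Int)) (f : Nat) : ∀ (q acc : List Int),
    bBfsIdx c f (acc ++ q) acc.length
      = bBfsAux (fun v => PySem.List.pyGetD c v []) f q acc := by
  induction f with
  | zero => intro q acc; simp [bBfsIdx, bBfsAux]
  | succ f ih =>
      intro q acc
      cases q with
      | nil => simp [bBfsIdx, bBfsAux]
      | cons v q' =>
          rw [bBfsIdx, bBfsAux]
          have hcond : acc.length < (acc ++ v :: q').length := by simp
          rw [if_pos hcond]
          have hget : (acc ++ v :: q').getD acc.length 0 = v := by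
            rw [List.getD_eq_getElem?_getD, List.getElem?_append_right (le_refl _)]
            simp
          rw [hget]
          have hre : acc ++ v :: q' ++ PySem.List.pyGetD c v []
              = (acc ++ [v]) ++ (q' ++ PySem.List.pyGetD c v []) := by simp
          have hlen : acc.length + 1 = (acc ++ [v]).length := by simp
          rw [hre, hlen, ih]

theorem bfsAux_acc (ch : Int → List Int) (f : Nat) : ∀ (q acc : List Int),
    bBfsAux ch f q acc = acc ++ bBfsAux ch f q [] := by
  induction f with
  | zero => intro q acc; simp [bBfsAux]
  | succ f ih =>
      intro q acc
      cases q with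
      | nil => simp [bBfsAux]
      | cons v q' =>
          rw [bBfsAux, bBfsAux, ih, ih (q' ++ ch v) ([] ++ [v])]
          simp

-- with enough fuel the queue is a prefix of what remains to be produced
theorem bfsAux_prefix (ch : Int → List Int) (f : Nat) : ∀ (q acc : List Int),
    ∃ extra, bBfsAux ch f q acc = acc ++ q ++ extra := by
  induction f with
  | zero => intro q acc; exact ⟨[], by simp [bBfsAux]⟩
  | succ f ih =>
      intro q acc
      cases q with
      | nil => exact ⟨[], by simp [bBfsAux]⟩
      | cons v q' =>
          obtain ⟨e, he⟩ := ih (q' ++ ch v) (acc ++ [v])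
          exact ⟨ch v ++ e, by rw [bBfsAux, he]; simp⟩

-- BFS facts: result is nodup, its elements are known, and children come after their parent.
theorem bfs_facts (ch : Int → List Int) (K : List Int)
    (h1K : (1 : Int) ∉ K)
    (hch1 : ∀ v w c, v ∈ 1 :: K → w ∈ 1 :: K → c ∈ ch v → c ∈ ch w → v = w)
    (hch2 : ∀ v, v ∈ 1 :: K → (ch v).Nodup)
    (hch3 : ∀ v c, v ∈ 1 :: K → c ∈ ch v → c ∈ K) :
    ∀ (f : Nat) (q acc : List Int), (acc ++ q).Nodup →
      acc ++ q = 1 :: acc.flatMap ch →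
      (∀ x ∈ acc ++ q, x ∈ 1 :: K) →
      K.length + 1 ≤ f + acc.length →
      (bBfsAux ch f q acc).Nodup ∧
      (∀ x ∈ bBfsAux ch f q acc, x ∈ 1 :: K) ∧
      (∀ i (h : i < (bBfsAux ch f q acc).length), acc.length ≤ i →
        ∀ c ∈ ch ((bBfsAux ch f q acc)[i]), c ∈ (bBfsAux ch f q acc).drop (i + 1)) := by
  intro f
  induction f with
  | zero =>
      intro q acc h1 h2 h3 h4
      have hsp : (acc ++ q).length ≤ (1 :: K).length :=
        (List.Nodup.subperm h1 h3).length_le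
      have hq : q = [] := by
        simp only [List.length_append, List.length_cons] at hsp
        have : q.length = 0 := by omega
        exact List.eq_nil_of_length_eq_zero this
      subst hq
      refine ⟨by simpa [bBfsAux] using h1, fun x hx => h3 x (by simpa [bBfsAux] using hx), ?_⟩
      intro i hlen hge
      exfalso
      simp only [bBfsAux, List.append_nil] at hlen
      omega
  | succ f ih =>
      intro q acc h1 h2 h3 h4
      cases q with
      | nil =>
          refine ⟨by simpa [bBfsAux] using h1, fun x hx => h3 x (by simpa [bBfsAux] using hx), ?_⟩
          intro i hlen hge
          exfalso
          simp only [bBfsAux] at hlen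
          omega
      | cons v q' =>
          have hvK : v ∈ 1 :: K := h3 v (by simp)
          have hvnacc : v ∉ acc := by
            have hd := List.disjoint_of_nodup_append h1
            intro hv; exact hd hv (by simp)
          have hre : (acc ++ [v]) ++ (q' ++ ch v) = (acc ++ v :: q') ++ ch v := by simp
          have hflat : (acc ++ [v]) ++ (q' ++ ch v) = 1 :: (acc ++ [v]).flatMap ch := by
            rw [hre, h2, List.flatMap_append]
            simp
          have hsubK : ∀ x ∈ ch v, x ∈ K := fun x hx => hch3 v x hvK hx
          have hnd' : ((acc ++ [v]) ++ (q' ++ ch v)).Nodup := by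
            rw [hre, List.nodup_append]
            refine ⟨h1, hch2 v hvK, ?_⟩
            intro x hx y hy hxy
            subst hxy
            have hxK : x ∈ K := hsubK x hy
            have hx1 : x ≠ 1 := fun h => h1K (h ▸ hxK)
            have hxf : x ∈ acc.flatMap ch := by
              have hx' := h2 ▸ hx
              rcases List.mem_cons.1 hx' with h | h
              · exact absurd h hx1
              · exact h
            obtain ⟨w, hw, hxw⟩ := List.mem_flatMap.1 hxf
            have hwK : w ∈ 1 :: K := h3 w (by simp [hw])
            have hwv : w = v := hch1 w v x hwK hvK hxw hy
            exact hvnacc (hwv ▸ hw)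
          have hsub' : ∀ x ∈ (acc ++ [v]) ++ (q' ++ ch v), x ∈ 1 :: K := by
            intro x hx
            rw [hre] at hx
            rcases List.mem_append.1 hx with h | h
            · exact h3 x h
            · exact List.mem_cons_of_mem _ (hsubK x h)
          have hfuel' : K.length + 1 ≤ f + (acc ++ [v]).length := by
            simp only [List.length_append, List.length_cons, List.length_nil]
            omega
          obtain ⟨ha, hb, hc⟩ := ih (q' ++ ch v) (acc ++ [v]) hnd' hflat hsub' hfuel'
          have hres : bBfsAux ch (f + 1) (v :: q') acc
              = bBfsAux ch f (q' ++ ch v) (acc ++ [v]) := rfl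
          refine ⟨hres ▸ ha, ?_, ?_⟩
          · intro x hx; exact hb x (hres ▸ hx)
          · intro i hlen hge
            rcases Nat.eq_or_lt_of_le hge with heq | hlt
            · -- i is v's own position: its children lie in the queue part that follows
              obtain ⟨e, he⟩ := bfsAux_prefix ch f (q' ++ ch v) (acc ++ [v])
              have hlen' : i < (bBfsAux ch f (q' ++ ch v) (acc ++ [v])).length := hres ▸ hlen
              have hv? : (bBfsAux ch f (q' ++ ch v) (acc ++ [v]))[i]? = some v := by
                rw [he, List.getElem?_append_left (by simp; omega),
                  List.getElem?_append_left (by simp; omega)]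
                rw [← heq]
                exact List.getElem?_concat_length
              have hgv : (bBfsAux ch (f + 1) (v :: q') acc)[i]'hlen = v := by
                have h5 := List.getElem?_eq_getElem hlen'
                rw [hv?] at h5
                exact (Option.some.inj h5).symm
              rw [hgv]
              intro c hc2
              show c ∈ (bBfsAux ch f (q' ++ ch v) (acc ++ [v])).drop (i + 1)
              rw [he]
              have hi1 : i + 1 = (acc ++ [v]).length := by simp; omega
              rw [List.append_assoc, hi1, List.drop_left]
              exact List.mem_append_left _ (List.mem_append_right _ hc2)
            · refine hc i (hres ▸ hlen) ?_
              simp only [List.length_append, List.length_cons, List.length_nil]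
              omega

-- A stabilisation lemma: once the fuel covers a node's position in the bottom-up order,
-- more fuel does not change A's dp values.
theorem stab (sales : List Int) (mA : PySem.Dict Int (List Int)) (rev : List Int)
    (hms : ∀ k (hk : k < rev.length), ∀ c ∈ mA.getD (rev[k]) [],
            ∃ j, ∃ hj : j < rev.length, j < k ∧ rev[j] = c) :
    ∀ k (hk : k < rev.length) (f : Nat), k ≤ f →
      aDpBoss sales mA (f + 1) (rev[k]) = aDpBoss sales mA (k + 1) (rev[k]) ∧
      aDpNot sales mA (f + 1) (rev[k]) = aDpNot sales mA (k + 1) (rev[k]) := by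
  intro k
  induction k using Nat.strong_induction_on with
  | _ k ih =>
    intro hk f hf
    -- every child's dp values are the same at fuel f and at fuel k
    have hchild : ∀ c ∈ mA.getD (rev[k]) [],
        aDpBoss sales mA f c = aDpBoss sales mA k c ∧
        aDpNot sales mA f c = aDpNot sales mA k c := by
      intro c hc
      obtain ⟨j, hjlen, hjk, hjc⟩ := hms k hk c hc
      obtain ⟨f', rfl⟩ : ∃ f', f = f' + 1 := ⟨f - 1, by omega⟩
      obtain ⟨k', rfl⟩ : ∃ k', k = k' + 1 := ⟨k - 1, by omega⟩
      have h1 := ih j hjk hjlen f' (by omega)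
      have h2 := ih j hjk hjlen k' (by omega)
      rw [← hjc] at *
      exact ⟨h1.1.trans h2.1.symm, h1.2.trans h2.2.symm⟩
    constructor
    · simp only [aDpBoss]
      by_cases h0 : (mA.getD (rev[k]) []).length = 0
      · simp [h0]
      · simp only [if_neg h0]
        rw [PySem.List.foldl_congr_mem (mA.getD (rev[k]) [])
          (fun acc nd => acc + min (aDpBoss sales mA f nd) (aDpNot sales mA f nd))
          (fun acc nd => acc + min (aDpBoss sales mA k nd) (aDpNot sales mA k nd)) 0
          (fun acc nd hnd => by simp only [(hchild nd hnd).1, (hchild nd hnd).2])]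
    · simp only [aDpNot]
      by_cases h0 : (mA.getD (rev[k]) []).length = 0
      · simp [h0]
      · simp only [if_neg h0]
        have hne : mA.getD (rev[k]) [] ≠ [] := by
          intro hnil
          exact h0 (by simp [hnil])
        have hhead : (mA.getD (rev[k]) []).headD 0 ∈ mA.getD (rev[k]) [] := by
          cases hmm : mA.getD (rev[k]) [] with
          | nil => exact absurd hmm hne
          | cons x t => simp
        rw [(hchild _ hhead).1,
          PySem.List.foldl_congr_mem (mA.getD (rev[k]) [])
          (fun (s : Int × Bool × Int) nd =>
            (s.1 + min (aDpBoss sales mA f nd) (aDpNot sales mA f nd),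
             s.2.1 || decide (aDpBoss sales mA f nd < aDpNot sales mA f nd),
             if aDpBoss sales mA f nd - aDpNot sales mA f nd < s.2.2
             then aDpBoss sales mA f nd - aDpNot sales mA f nd else s.2.2))
          (fun (s : Int × Bool × Int) nd =>
            (s.1 + min (aDpBoss sales mA k nd) (aDpNot sales mA k nd),
             s.2.1 || decide (aDpBoss sales mA k nd < aDpNot sales mA k nd),
             if aDpBoss sales mA k nd - aDpNot sales mA k nd < s.2.2
             then aDpBoss sales mA k nd - aDpNot sales mA k nd else s.2.2))
          (0, false, aDpBoss sales mA k ((mA.getD (rev[k]) []).headD 0))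
          (fun st nd hnd => by simp only [(hchild nd hnd).1, (hchild nd hnd).2])]

-- A's three-accumulator dp_not loop, described componentwise.
theorem aNot_fold (A N : Int → Int) (l : List Int) (s : Int) (bc : Bool) (mv : Int) :
    l.foldl (fun (st : Int × Bool × Int) nd =>
        (st.1 + min (A nd) (N nd),
         st.2.1 || decide (A nd < N nd),
         if A nd - N nd < st.2.2 then A nd - N nd else st.2.2)) (s, bc, mv)
      = (s + (l.map (fun nd => min (A nd) (N nd))).sum,
         bc || l.any (fun nd => A nd < N nd),
         (l.map (fun nd => A nd - N nd)).foldl (fun m d => if d < m then d else m) mv) := by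
  induction l generalizing s bc mv with
  | nil => simp
  | cons x t ih => simp [ih, add_assoc, Bool.or_assoc]

-- The table built by B's backward pass holds exactly A's dp values.
theorem tbl (sales : List Int) (mA : PySem.Dict Int (List Int)) (children : List (List Int))
    (rev : List Int) (hnd : rev.Nodup)
    (hAB : ∀ k (hk : k < rev.length),
            mA.getD (rev[k]) [] = PySem.List.pyGetD children (rev[k]) [])
    (hms : ∀ k (hk : k < rev.length), ∀ c ∈ mA.getD (rev[k]) [],
            ∃ j, ∃ hj : j < rev.length, j < k ∧ rev[j] = c) :
    ∀ k (hk : k ≤ rev.length), ∀ j (hj : j < k),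
      ((rev.take k).foldl (bStep sales children) PySem.Dict.empty).getD
          (rev[j]'(lt_of_lt_of_le hj hk)) (0, 0)
        = (aDpBoss sales mA (j + 1) (rev[j]'(lt_of_lt_of_le hj hk)),
           aDpNot sales mA (j + 1) (rev[j]'(lt_of_lt_of_le hj hk))) := by
  intro k
  induction k with
  | zero => intro hk j hj; omega
  | succ k ihk =>
    intro hk j hj
    have hkl : k < rev.length := by omega
    have htake : rev.take (k + 1) = rev.take k ++ [rev[k]'hkl] := by
      rw [List.take_add_one, List.getElem?_eq_getElem hkl]
      rfl
    rw [htake, List.foldl_append, List.foldl_cons, List.foldl_nil]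
    have hstep : ∃ pr, bStep sales children
        ((rev.take k).foldl (bStep sales children) PySem.Dict.empty) (rev[k]'hkl)
        = ((rev.take k).foldl (bStep sales children) PySem.Dict.empty).insert (rev[k]'hkl) pr := by
      simp only [bStep]
      split_ifs <;> exact ⟨_, rfl⟩
    rcases Nat.lt_succ_iff_lt_or_eq.mp hj with hjk | rfl
    · -- an earlier entry is untouched by this insert
      obtain ⟨pr, hpr⟩ := hstep
      rw [hpr, PySem.Dict.getD_insert, if_neg, ihk (le_of_lt hkl) j hjk]
      rw [(List.Nodup.getElem_inj_iff hnd)]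
      omega
    · -- the new entry: B's per-node computation equals A's dp pair
      have hms0 : mA.getD (rev[j]'hkl) [] = PySem.List.pyGetD children (rev[j]'hkl) [] :=
        hAB j hkl
      have hvals : ∀ c ∈ PySem.List.pyGetD children (rev[j]'hkl) [],
          ((rev.take j).foldl (bStep sales children) PySem.Dict.empty).getD c (0, 0)
            = (aDpBoss sales mA j c, aDpNot sales mA j c) := by
        intro c hc
        have hc' : c ∈ mA.getD (rev[j]'hkl) [] := by rw [hms0]; exact hc
        obtain ⟨j', hj'len, hj'k, hj'c⟩ := hms j hkl c hc'
        obtain ⟨k', rfl⟩ : ∃ k'', j = k'' + 1 := ⟨j - 1, by omega⟩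
        have ht := ihk (le_of_lt hkl) j' hj'k
        have hs := stab sales mA rev hms j' hj'len k' (by omega)
        rw [← hj'c, ht, ← hs.1, ← hs.2]
      by_cases hnil : PySem.List.pyGetD children (rev[j]'hkl) [] = []
      · simp only [bStep, hnil, if_pos]
        rw [PySem.Dict.getD_insert, if_pos rfl]
        simp [aDpBoss, aDpNot, hms0, hnil]
      · have hlen0 : ¬ (PySem.List.pyGetD children (rev[j]'hkl) []).length = 0 := by
          simpa [List.length_eq_zero_iff] using hnil
        obtain ⟨x, t, hxt⟩ : ∃ x t, PySem.List.pyGetD children (rev[j]'hkl) [] = x :: t := by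
          cases hc : PySem.List.pyGetD children (rev[j]'hkl) [] with
          | nil => exact absurd hc hnil
          | cons a b => exact ⟨a, b, rfl⟩
        have hmapg : (PySem.List.pyGetD children (rev[j]'hkl) []).map
              (fun c => ((rev.take j).foldl (bStep sales children) PySem.Dict.empty).getD c (0, 0))
            = (PySem.List.pyGetD children (rev[j]'hkl) []).map
              (fun c => (aDpBoss sales mA j c, aDpNot sales mA j c)) :=
          List.map_congr_left hvals
        simp only [bStep, if_neg hnil]
        rw [hmapg]
        simp only [aDpBoss, aDpNot, hms0, if_neg hlen0]
        rw [aNot_fold (aDpBoss sales mA j) (aDpNot sales mA j), PySem.List.foldl_add]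
        simp only [List.any_map, List.map_map, List.foldl_map, Function.comp_def, hxt,
          List.headD_cons, List.map_cons, List.foldl_cons, List.any_cons]
        by_cases hany : (decide (aDpBoss sales mA j x < aDpNot sales mA j x) ||
            t.any fun nd => decide (aDpBoss sales mA j nd < aDpNot sales mA j nd)) = true
        · rw [if_pos hany, PySem.Dict.getD_insert, if_pos rfl]
          rw [Bool.false_or, if_neg (by simp [hany])]
          refine Prod.ext ?_ ?_
          · ring
          · ring
        · rw [if_neg hany, PySem.Dict.getD_insert, if_pos rfl]
          rw [Bool.false_or, if_pos (Bool.eq_false_iff.mpr hany)]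
          refine Prod.ext ?_ ?_
          · ring
          · ring

-- ===== VERDICT (by name: the statement is the Claim_ definition above) =====
theorem solution_spec : Claim_equal_solution := by
  intro sales links _ hpre
  obtain ⟨-, hrange, hnodup⟩ := hpre
  simp only [Spec_solution, solution, solution_alt]
  have hbr := bfs_bridge (bChildren links) (links.length + 1) [1] []
  simp only [List.nil_append, List.length_nil] at hbr
  rw [hbr]
  set ch : Int → List Int := fun v => PySem.List.pyGetD (bChildren links) v [] with hch
  set K : List Int := links.map Prod.snd with hK
  have hchEq : ∀ v : Int, 0 ≤ v → v < (links.length : Int) + 2 →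
      ch v = (links.filter (fun p => p.1 == v)).map (·.2) := by
    intro v h0 h2
    show PySem.List.pyGetD (bChildren links) v [] = _
    rw [bChildren, bBuild_getD links _ (fun p hp => by
        have := hrange p hp
        simp only [List.length_replicate]
        push_cast
        omega) v h0 (by simp only [List.length_replicate]; push_cast; omega)]
    have hbase : PySem.List.pyGetD (List.replicate (links.length + 1 + 1) ([] : List Int)) v []
        = [] := by
      have hcast : v = ((v.toNat : Nat) : Int) := by omega
      rw [hcast, PySem.List.pyGetD_natCast]
      simp only [List.getD, List.getElem?_replicate]
      split <;> simp
    rw [hbase, List.nil_append]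
  have hbound : ∀ v : Int, v ∈ 1 :: K → 1 ≤ v ∧ v ≤ (links.length : Int) + 1 := by
    intro v hv
    rcases List.mem_cons.1 hv with rfl | hv
    · have : (0 : Int) ≤ links.length := Int.natCast_nonneg _
      omega
    · obtain ⟨p, hp, rfl⟩ := List.mem_map.1 hv
      have := hrange p hp
      omega
  have h1K : (1 : Int) ∉ K := by
    intro h
    obtain ⟨p, hp, h2⟩ := List.mem_map.1 h
    have := hrange p hp
    omega
  have hchK : ∀ v, v ∈ 1 :: K → ch v = (links.filter (fun p => p.1 == v)).map (·.2) := by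
    intro v hv
    have := hbound v hv
    exact hchEq v (by omega) (by omega)
  have hch3 : ∀ v c : Int, v ∈ 1 :: K → c ∈ ch v → c ∈ K := by
    intro v c hv hc
    rw [hchK v hv] at hc
    obtain ⟨p, hp, rfl⟩ := List.mem_map.1 hc
    exact List.mem_map.2 ⟨p, List.mem_of_mem_filter hp, rfl⟩
  have hch2 : ∀ v : Int, v ∈ 1 :: K → (ch v).Nodup := by
    intro v hv
    rw [hchK v hv]
    exact List.Nodup.sublist (List.Sublist.map _ List.filter_sublist) hnodup
  have hch1 : ∀ v w c : Int, v ∈ 1 :: K → w ∈ 1 :: K → c ∈ ch v → c ∈ ch w → v = w := by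
    intro v w c hv hw hcv hcw
    rw [hchK v hv] at hcv
    rw [hchK w hw] at hcw
    obtain ⟨p, hp, hp2⟩ := List.mem_map.1 hcv
    obtain ⟨q, hq, hq2⟩ := List.mem_map.1 hcw
    have hpv : p.1 = v := by simpa using (List.mem_filter.1 hp).2
    have hqw : q.1 = w := by simpa using (List.mem_filter.1 hq).2
    have hpq : p = q := List.inj_on_of_nodup_map hnodup (List.mem_of_mem_filter hp)
      (List.mem_of_mem_filter hq) (by rw [hp2, hq2])
    rw [← hpv, ← hqw, hpq]
  obtain ⟨hndO, hsubO, hordO⟩ := bfs_facts ch K h1K hch1 hch2 hch3 (links.length + 1) [1] []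
    (by simp) (by simp) (by intro x hx; simp at hx; simp [hx]) (by rw [hK]; simp)
  set order := bBfsAux ch (links.length + 1) [1] [] with horder
  have h1st : order = 1 :: bBfsAux ch links.length ([] ++ ch 1) [] := by
    rw [horder,
      show bBfsAux ch (links.length + 1) [1] [] = bBfsAux ch links.length ([] ++ ch 1) ([] ++ [1])
        from rfl,
      bfsAux_acc ch links.length ([] ++ ch 1) ([] ++ [1])]
    simp
  have hlenpos : 0 < order.length := by rw [h1st]; simp
  set rev := order.reverse with hrev
  have hlenOR : rev.length = order.length := List.length_reverse
  have hndR : rev.Nodup := List.nodup_reverse.2 hndO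
  have hsubR : ∀ x ∈ rev, x ∈ 1 :: K := fun x hx => hsubO x (List.mem_reverse.1 hx)
  have hABv : ∀ v : Int, v ∈ 1 :: K →
      (aMates ((links.length : Int) + 1) links).getD v [] = ch v := by
    intro v hv
    rw [aMates_getD, hchK v hv]
  have hABrev : ∀ k (hk : k < rev.length),
      (aMates ((links.length : Int) + 1) links).getD (rev[k]) []
        = PySem.List.pyGetD (bChildren links) (rev[k]) [] := by
    intro k hk
    exact hABv _ (hsubR _ (List.getElem_mem hk))
  have hmsrev : ∀ k (hk : k < rev.length),
      ∀ c ∈ (aMates ((links.length : Int) + 1) links).getD (rev[k]) [],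
      ∃ j, ∃ hj : j < rev.length, j < k ∧ rev[j] = c := by
    intro k hk c hc
    rw [hABv _ (hsubR _ (List.getElem_mem hk))] at hc
    have hiO : order.length - 1 - k < order.length := by omega
    have hrevk : rev[k] = order[order.length - 1 - k]'hiO := by
      rw [List.getElem_reverse]
    rw [hrevk] at hc
    have hdrop := hordO (order.length - 1 - k) hiO (Nat.zero_le _) c hc
    have htk : c ∈ rev.take k := by
      have h1 : (order.drop (order.length - 1 - k + 1)).reverse
          = rev.take (order.length - (order.length - 1 - k + 1)) := List.reverse_drop
      have h2 : order.length - (order.length - 1 - k + 1) = k := by omega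
      rw [h2] at h1
      rw [← h1]
      exact List.mem_reverse.2 hdrop
    obtain ⟨j, hjl, hje⟩ := List.mem_iff_getElem.1 htk
    have hjk : j < k := by
      have := hjl
      simp [List.length_take] at this
      omega
    refine ⟨j, by omega, hjk, ?_⟩
    rw [← hje, List.getElem_take]
  have hlenle : rev.length ≤ links.length + 1 := by
    have hsp := (List.Nodup.subperm hndR hsubR).length_le
    simp only [List.length_cons, hK, List.length_map] at hsp
    omega
  have hT := tbl sales (aMates ((links.length : Int) + 1) links) (bChildren links) rev hndR
    hABrev hmsrev rev.length le_rfl (rev.length - 1) (by omega)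
  rw [List.take_length] at hT
  obtain ⟨tl, htl⟩ : ∃ tl, order = 1 :: tl := ⟨_, h1st⟩
  have hrevform : rev = tl.reverse ++ [1] := by rw [hrev, htl]; simp
  have hidx : rev.length - 1 = tl.reverse.length := by rw [hrevform]; simp
  have hroot : rev[rev.length - 1]'(by omega) = (1 : Int) := by
    have h? : rev[rev.length - 1]? = some 1 := by
      rw [hidx, hrevform, List.getElem?_concat_length]
    have h5 := List.getElem?_eq_getElem (l := rev) (i := rev.length - 1) (by omega)
    rw [h?] at h5
    exact (Option.some.inj h5).symm
  rw [hroot] at hT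
  have hs := stab sales (aMates ((links.length : Int) + 1) links) rev hmsrev (rev.length - 1)
    (by omega) links.length (by omega)
  rw [hroot] at hs
  have hfe : rev.length - 1 + 1 = rev.length := by omega
  rw [hfe] at hT hs
  rw [hs.1, hs.2, hT]
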